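-- pv_equiv track=rewrite | github.com/code4tots/googlecodejam-1 | 2013/2/B/B.py | solve
-- ===== SOURCE A (Python) =====
-- def solve(N,P):
-- 	# worst number that *could* win
-- 	# need to know how many of the first games must be won to guarantee
-- 	# a win.
-- 	wins = 0
-- 	guarantee = 2 ** N - 1 # guaranteed position -- losing every match afterwards results in this position
-- 	while guarantee >= P:
-- 		wins += 1
-- 		guarantee //= 2
--
-- 	# Now we know how many wins we need.
-- 	# Now let's see what position we need to be to have a chance
-- 	# at getting those wins.
-- 	b = 2 ** N - 2 ** wins
--
-- 	# worst number that *must* win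
-- 	# need to know how many of the first games you can lose and still win.
-- 	losses = 0
-- 	possible = 0 # possible position -- winning every match afterwards results in this position
-- 	size = 2 ** N
-- 	if P == 2 ** N:
-- 		# If there is prize for everyone, we will never be pushed over the edge.
-- 		# We can lose all N matches and still get a prize.
-- 		losses = N
-- 	else:
-- 		# Try losing matches and see how many takes us over the edge.
-- 		while possible < P:
-- 			losses += 1
-- 			size //= 2
-- 			possible += size
-- 		losses -= 1 # The last loss pushed us over the edge. We want max number loss while still winning prize.
--
-- 	# Now we know how many losses we can have at most.
-- 	# We need a position that can have at most this many losses.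
-- 	# However, we also don't want to go past the end
-- 	a = min(2 ** (losses + 1) - 2, 2 ** N - 1)
--
-- 	return a, b
-- ===== SOURCE B (Python) =====
-- def solve(N, P):
--     # closed-form via bit lengths instead of the two while loops
--     wins = max(0, N - P.bit_length() + 1)
--     b = 2 ** N - 2 ** wins
--     if P == 2 ** N:
--         losses = N
--     else:
--         losses = max(0, N - (2 ** N - P).bit_length())
--     a = min(2 ** (losses + 1) - 2, 2 ** N - 1)
--     return a, b
-- ===== Notes on version B (the rewrite author's own statement) =====
-- stated objective: simpler
-- what changed: Both while loops are replaced by closed-form bit-length formulas (wins = max(0, N - P.bit_length() + 1), losses = max(0, N - (2**N - P).bit_length()) when P != 2**N); Pre_ excludes N < 0 (2**N is a float, A returns non-int floats or diverges), P <= 0 (A's first loop never terminates) and P > 2**N (A's second loop never terminates).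
-- outside the precondition, e.g. on solve(-1, 0): A returns (-1, -0.5), B raises AttributeError
import Mathlib
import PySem

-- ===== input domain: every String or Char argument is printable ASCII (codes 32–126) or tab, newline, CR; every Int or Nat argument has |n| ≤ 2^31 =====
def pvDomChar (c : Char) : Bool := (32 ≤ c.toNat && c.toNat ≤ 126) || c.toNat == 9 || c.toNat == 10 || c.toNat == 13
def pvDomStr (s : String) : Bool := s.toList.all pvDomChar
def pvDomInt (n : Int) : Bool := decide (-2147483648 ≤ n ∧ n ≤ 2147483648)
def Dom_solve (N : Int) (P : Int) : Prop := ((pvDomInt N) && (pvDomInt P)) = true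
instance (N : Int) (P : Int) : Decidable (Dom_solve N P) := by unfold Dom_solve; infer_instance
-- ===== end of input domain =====

-- B replaces A's two while loops by closed-form bit-length formulas (objective: simpler).

-- ===== PORT A =====
-- `while guarantee >= P: wins += 1; guarantee //= 2` (fuel covers the loop: on Pre_ it
-- runs at most N times, since guarantee reaches 0 after N halvings and P >= 1)
def winsLoopA : Nat → Int → Int → Int → Int
  | 0, _, _, wins => wins
  | fuel+1, P, g, wins =>
    if P ≤ g then winsLoopA fuel P (PySem.Int.floordiv g 2) (wins + 1) else wins

-- `while possible < P: losses += 1; size //= 2; possible += size` (fuel covers the loop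
-- on Pre_: possible reaches 2^N - 1 >= P after N iterations)
def lossLoopA : Nat → Int → Int → Int → Int → Int
  | 0, _, _, _, l => l
  | fuel+1, P, possible, size, l =>
    if possible < P then
      lossLoopA fuel P (possible + PySem.Int.floordiv size 2) (PySem.Int.floordiv size 2) (l + 1)
    else l

def solve (N : Int) (P : Int) : Int × Int :=
  let wins := winsLoopA (N.toNat + 1) P ((2:Int) ^ N.toNat - 1) 0
  let b := (2:Int) ^ N.toNat - 2 ^ wins.toNat
  let losses : Int :=
    if P = (2:Int) ^ N.toNat then N
    else lossLoopA (N.toNat + 1) P 0 ((2:Int) ^ N.toNat) 0 - 1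
  let a := min ((2:Int) ^ (losses + 1).toNat - 2) ((2:Int) ^ N.toNat - 1)
  (a, b)

-- ===== PORT B =====
def solve_alt (N : Int) (P : Int) : Int × Int :=
  let wins : Int := max 0 (N - (PySem.Int.bitLength P : Int) + 1)
  let b := (2:Int) ^ N.toNat - 2 ^ wins.toNat
  let losses : Int :=
    if P = (2:Int) ^ N.toNat then N
    else max 0 (N - (PySem.Int.bitLength ((2:Int) ^ N.toNat - P) : Int))
  let a := min ((2:Int) ^ (losses + 1).toNat - 2) ((2:Int) ^ N.toNat - 1)
  (a, b)

-- ===== PRECONDITION & SPEC =====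
-- Pre_ excludes N < 0 (Python's 2**N is then a float, so A returns/handles non-int values
-- or diverges), P <= 0 (A's first while loop never terminates) and P > 2**N (A's second
-- while loop never terminates): exactly the inputs where A diverges or leaves the type.
def Pre_solve (N : Int) (P : Int) : Prop :=
  0 ≤ N ∧ 1 ≤ P ∧ P ≤ (2:Int) ^ N.toNat
instance (N : Int) (P : Int) : Decidable (Pre_solve N P) := by unfold Pre_solve; infer_instance

def pvWitness_solve : Int × Int := (3, 5)

def Spec_solve (N : Int) (P : Int) (out : Int × Int) : Prop := out = solve_alt N P
instance (N : Int) (P : Int) (out : Int × Int) : Decidable (Spec_solve N P out) := by unfold Spec_solve; infer_instance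

-- ===== CLAIM (what is proved, stated in full; the proofs are below) =====
def Claim_equal_solve : Prop := ∀ (N : Int) (P : Int), Dom_solve N P → Pre_solve N P → Spec_solve N P (solve N P)

-- ===== LEMMAS AND PROOFS =====

-- bitLength bracketing, in the form the loop proofs use.
lemma two_pow_le_iff_bitLength (p : Int) (hp : 1 ≤ p) (m : Nat) :
    (2:Int) ^ m ≤ p ↔ m + 1 ≤ PySem.Int.bitLength p := by
  have h1 := PySem.Int.lt_two_pow_bitLength p
  have h2 := PySem.Int.two_pow_bitLength_le p (by omega)
  have hpn : ((p.natAbs : Int)) = p := Int.natAbs_of_nonneg (by omega)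
  constructor
  · intro h
    have h' : (2:Int) ^ m ≤ (p.natAbs : Int) := by rw [hpn]; exact h
    have hnat : (2:Nat) ^ m ≤ p.natAbs := by exact_mod_cast h'
    have hlt : (2:Nat) ^ m < 2 ^ PySem.Int.bitLength p := lt_of_le_of_lt hnat h1
    have := (Nat.pow_lt_pow_iff_right (a := 2) (by omega)).mp hlt
    omega
  · intro h
    have hm : m ≤ PySem.Int.bitLength p - 1 := by omega
    have hnat : (2:Nat) ^ m ≤ p.natAbs :=
      le_trans (Nat.pow_le_pow_right (by omega) hm) h2
    have : (2:Int) ^ m ≤ (p.natAbs : Int) := by exact_mod_cast hnat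
    omega

lemma floordiv_two_mul_add_one (x : Int) : PySem.Int.floordiv (2 * x + 1) 2 = x := by
  rw [PySem.Int.floordiv_eq_iff_of_pos (by omega)]; omega

lemma floordiv_two_mul (x : Int) : PySem.Int.floordiv (2 * x) 2 = x := by
  rw [PySem.Int.floordiv_eq_iff_of_pos (by omega)]; omega

lemma winsLoopA_eq (P : Int) (hP : 1 ≤ P) :
    ∀ (m fuel : Nat), m < fuel → ∀ w : Int,
      winsLoopA fuel P ((2:Int) ^ m - 1) w
        = w + max 0 ((m : Int) - (PySem.Int.bitLength P : Int) + 1) := by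
  intro m
  induction m with
  | zero =>
    intro fuel hf w
    obtain ⟨f, rfl⟩ : ∃ f, fuel = f + 1 := ⟨fuel - 1, by omega⟩
    have hbl := (two_pow_le_iff_bitLength P hP 0).mp (by simpa using hP)
    simp only [winsLoopA, pow_zero]
    rw [if_neg (by omega)]
    omega
  | succ m ih =>
    intro fuel hf w
    obtain ⟨f, rfl⟩ : ∃ f, fuel = f + 1 := ⟨fuel - 1, by omega⟩
    simp only [winsLoopA]
    by_cases hc : P ≤ (2:Int) ^ (m+1) - 1
    · rw [if_pos hc]
      have hfd : PySem.Int.floordiv ((2:Int) ^ (m+1) - 1) 2 = (2:Int) ^ m - 1 := by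
        have : (2:Int) ^ (m+1) - 1 = 2 * ((2:Int) ^ m - 1) + 1 := by ring
        rw [this, floordiv_two_mul_add_one]
      rw [hfd, ih f (by omega) (w + 1)]
      have hbl : ¬ ((m:Nat) + 1 + 1 ≤ PySem.Int.bitLength P) := by
        rw [← two_pow_le_iff_bitLength P hP]; omega
      omega
    · rw [if_neg hc]
      have hbl : (m:Nat) + 1 + 1 ≤ PySem.Int.bitLength P := by
        rw [← two_pow_le_iff_bitLength P hP]; omega
      omega

lemma lossLoopA_eq (P C : Int) (_hP : 1 ≤ P) (hPC : P ≤ C - 1) :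
    ∀ (m fuel : Nat), m < fuel → ∀ l : Int,
      lossLoopA fuel P (C - (2:Int) ^ m) ((2:Int) ^ m) l
        = l + max 0 ((m : Int) + 1 - (PySem.Int.bitLength (C - P) : Int)) := by
  have hQ : 1 ≤ C - P := by omega
  intro m
  induction m with
  | zero =>
    intro fuel hf l
    obtain ⟨f, rfl⟩ : ∃ f, fuel = f + 1 := ⟨fuel - 1, by omega⟩
    have hbl := (two_pow_le_iff_bitLength (C - P) hQ 0).mp (by simpa using hQ)
    simp only [lossLoopA, pow_zero]
    rw [if_neg (by omega)]
    omega
  | succ m ih =>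
    intro fuel hf l
    obtain ⟨f, rfl⟩ : ∃ f, fuel = f + 1 := ⟨fuel - 1, by omega⟩
    simp only [lossLoopA]
    have hfd : PySem.Int.floordiv ((2:Int) ^ (m+1)) 2 = (2:Int) ^ m := by
      have : (2:Int) ^ (m+1) = 2 * (2:Int) ^ m := by ring
      rw [this, floordiv_two_mul]
    by_cases hc : C - (2:Int) ^ (m+1) < P
    · rw [if_pos hc, hfd]
      have hps : C - (2:Int) ^ (m+1) + (2:Int) ^ m = C - (2:Int) ^ m := by ring
      rw [hps, ih f (by omega) (l + 1)]
      have hbl : ¬ ((m:Nat) + 1 + 1 ≤ PySem.Int.bitLength (C - P)) := by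
        rw [← two_pow_le_iff_bitLength (C - P) hQ]; omega
      omega
    · rw [if_neg hc]
      have hbl : (m:Nat) + 1 + 1 ≤ PySem.Int.bitLength (C - P) := by
        rw [← two_pow_le_iff_bitLength (C - P) hQ]; omega
      omega

-- ===== VERDICT (by name: the statement is the Claim_ definition above) =====
theorem solve_spec : Claim_equal_solve := by
  intro N P _ hPre
  obtain ⟨hN, hP, hPle⟩ := hPre
  unfold Spec_solve solve solve_alt
  have hNn : (N.toNat : Int) = N := Int.toNat_of_nonneg hN
  have hwins : winsLoopA (N.toNat + 1) P ((2:Int) ^ N.toNat - 1) 0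
      = max 0 (N - (PySem.Int.bitLength P : Int) + 1) := by
    have h := winsLoopA_eq P hP N.toNat (N.toNat + 1) (by omega) 0
    rw [zero_add, hNn] at h
    exact h
  rw [hwins]
  by_cases hPeq : P = (2:Int) ^ N.toNat
  · simp only [if_pos hPeq]
  · simp only [if_neg hPeq]
    have hPle' : P ≤ (2:Int) ^ N.toNat - 1 := by omega
    have hloss := lossLoopA_eq P ((2:Int) ^ N.toNat) hP hPle' N.toNat (N.toNat + 1) (by omega) 0
    rw [sub_self, zero_add] at hloss
    rw [hloss]
    have hQ : 1 ≤ (2:Int) ^ N.toNat - P := by omega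
    have hbl : ¬ (N.toNat + 1 ≤ PySem.Int.bitLength ((2:Int) ^ N.toNat - P)) := by
      rw [← two_pow_le_iff_bitLength _ hQ]; omega
    have : max 0 ((N.toNat : Int) + 1 - (PySem.Int.bitLength ((2:Int) ^ N.toNat - P) : Int)) - 1
        = max 0 (N - (PySem.Int.bitLength ((2:Int) ^ N.toNat - P) : Int)) := by omega
    rw [this]
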